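-- pv_equiv track=rewrite | github.com/s-koide-dc/Design2Code | src/design_parser/structured_parser.py | _strip_leading_numbering
-- ===== SOURCE A (Python) =====
-- def _strip_leading_numbering(text: str) -> str:
--     s = str(text).strip()
--     i = 0
--     while i < len(s) and s[i].isdigit():
--         i += 1
--     if i > 0 and i < len(s) and s[i] == ".":
--         if i + 1 < len(s) and s[i+1].isspace():
--             return s[i+2:].strip()
--     return s
-- ===== SOURCE B (Python) =====
-- def _strip_leading_numbering(text: str) -> str:
--     s = str(text).strip()
--     head, sep, tail = s.partition(".")
--     if sep and head.isdigit() and tail and tail[0].isspace():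
--         return tail[1:].strip()
--     return s
-- ===== Notes on version B (the rewrite author's own statement) =====
-- stated objective: simpler
-- what changed: Replaces A's manual index-based while-loop digit scan plus guarded indexing with a single str.partition at the first dot of the stripped string and validation of head (isdigit) and tail (leading whitespace).
import Mathlib
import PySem

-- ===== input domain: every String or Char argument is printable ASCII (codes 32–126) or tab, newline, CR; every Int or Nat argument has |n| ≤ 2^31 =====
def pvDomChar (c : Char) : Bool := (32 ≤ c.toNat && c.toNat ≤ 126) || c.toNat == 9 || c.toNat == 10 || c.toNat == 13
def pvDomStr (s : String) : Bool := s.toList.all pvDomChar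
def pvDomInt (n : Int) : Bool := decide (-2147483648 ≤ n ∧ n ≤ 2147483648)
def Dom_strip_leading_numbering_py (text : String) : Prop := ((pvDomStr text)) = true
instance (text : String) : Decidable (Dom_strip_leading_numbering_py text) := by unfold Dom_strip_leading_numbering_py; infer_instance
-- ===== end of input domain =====

-- B replaces A's index-based digit-scanning while-loop by a single partition(".") of the
-- stripped string plus validation of head/tail (objective: simpler decomposition, same cost).


-- ===== PORT A =====
-- A's while loop 'i = 0; while i < len(s) and s[i].isdigit(): i += 1' (i = number of leading digit chars)
def pvScanA : List Char → Nat
  | [] => 0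
  | c :: rest => if PySem.Chars.isdigit c then pvScanA rest + 1 else 0

def strip_leading_numbering_py (text : String) : String :=
  let s := PySem.Chars.strip text.toList
  let i := pvScanA s
  if 0 < i ∧ i < s.length ∧ PySem.List.pyGet? s (i : Int) = some '.' then
    if i + 1 < s.length ∧ (PySem.List.pyGet? s ((i : Int) + 1)).any PySem.Chars.isspace then
      String.ofList (PySem.Chars.strip (PySem.List.slice s (some ((i : Int) + 2)) none))
    else String.ofList s
  else String.ofList s

-- ===== PORT B =====
-- B's s.partition("."): (part before the first dot, whether a dot exists, part after it)
def pvPartitionDot : List Char → List Char × Bool × List Char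
  | [] => ([], false, [])
  | c :: rest =>
    if c = '.' then ([], true, rest)
    else
      let (h, f, t) := pvPartitionDot rest
      (c :: h, f, t)

def strip_leading_numbering_py_alt (text : String) : String :=
  let s := PySem.Chars.strip text.toList
  let (head, sep, tail) := pvPartitionDot s
  if sep ∧ PySem.Chars.strIsdigit head ∧ (tail.head?.any PySem.Chars.isspace) then
    String.ofList (PySem.Chars.strip (PySem.List.slice tail (some 1) none))
  else String.ofList s

-- ===== PRECONDITION & SPEC =====
def Spec_strip_leading_numbering_py (text : String) (out : String) : Prop := out = strip_leading_numbering_py_alt text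
instance (text : String) (out : String) : Decidable (Spec_strip_leading_numbering_py text out) := by unfold Spec_strip_leading_numbering_py; infer_instance

-- ===== CLAIM (what is proved, stated in full; the proofs are below) =====
def Claim_equal_strip_leading_numbering_py : Prop := ∀ (text : String), Dom_strip_leading_numbering_py text → Spec_strip_leading_numbering_py text (strip_leading_numbering_py text)

-- ===== LEMMAS AND PROOFS =====
theorem scan_eq (s : List Char) : pvScanA s = (s.takeWhile PySem.Chars.isdigit).length := by
  induction s with
  | nil => rfl
  | cons c rest ih =>
    simp only [pvScanA, List.takeWhile]
    cases h : PySem.Chars.isdigit c <;> simp [ih]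

theorem part_nodot (s : List Char) (h : '.' ∉ s) : pvPartitionDot s = (s, false, []) := by
  induction s with
  | nil => rfl
  | cons c rest ih =>
    simp only [List.mem_cons, not_or] at h
    simp [pvPartitionDot, Ne.symm h.1, ih h.2]

theorem part_append (d s : List Char) (h : '.' ∉ d) :
    pvPartitionDot (d ++ s)
      = (d ++ (pvPartitionDot s).1, (pvPartitionDot s).2.1, (pvPartitionDot s).2.2) := by
  induction d with
  | nil => simp
  | cons c rest ih =>
    simp only [List.mem_cons, not_or] at h
    simp [pvPartitionDot, Ne.symm h.1, ih h.2]

theorem dropWhile_head (p : Char → Bool) (s : List Char) (c : Char) (t : List Char)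
    (h : s.dropWhile p = c :: t) : p c = false := by
  have := List.head?_dropWhile_not p s
  rw [h] at this; simpa using this

theorem pyGet_append (p t : List Char) (c : Char) :
    PySem.List.pyGet? (p ++ c :: t) ((p.length : Nat) : Int) = some c := by simp [pysem]

theorem slice_append (p t : List Char) :
    PySem.List.slice (p ++ t) (some ((p.length : Nat) : Int)) none = t := by simp [pysem]

theorem slice_one (c : Char) (t : List Char) :
    PySem.List.slice (c :: t) (some 1) none = t := by simp [pysem]

theorem pv_main (s : List Char) :
    (let i := pvScanA s;
     if 0 < i ∧ i < s.length ∧ PySem.List.pyGet? s (i : Int) = some '.' then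
       if i + 1 < s.length ∧ (PySem.List.pyGet? s ((i : Int) + 1)).any PySem.Chars.isspace then
         String.ofList (PySem.Chars.strip (PySem.List.slice s (some ((i : Int) + 2)) none))
       else String.ofList s
     else String.ofList s)
    =
    (let (head, sep, tail) := pvPartitionDot s;
     if sep ∧ PySem.Chars.strIsdigit head ∧ (tail.head?.any PySem.Chars.isspace) then
       String.ofList (PySem.Chars.strip (PySem.List.slice tail (some 1) none))
     else String.ofList s) := by
  have hdig : ∀ c ∈ s.takeWhile PySem.Chars.isdigit, PySem.Chars.isdigit c = true :=
    fun c hc => List.mem_takeWhile_imp hc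
  have hnd : '.' ∉ s.takeWhile PySem.Chars.isdigit := by
    intro hm; have := hdig _ hm; simp [PySem.Chars.isdigit] at this
  have hsplit : s = s.takeWhile PySem.Chars.isdigit ++ s.dropWhile PySem.Chars.isdigit :=
    (List.takeWhile_append_dropWhile).symm
  have hscan : pvScanA s = (s.takeWhile PySem.Chars.isdigit).length := scan_eq s
  generalize hd : s.takeWhile PySem.Chars.isdigit = d at hdig hnd hsplit hscan
  generalize hr : s.dropWhile PySem.Chars.isdigit = r at hsplit
  cases hrc : r with
  | nil =>
    rw [hrc, List.append_nil] at hsplit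
    have hpart : pvPartitionDot s = (s, false, []) := part_nodot s (hsplit ▸ hnd)
    rw [hscan, hpart]
    simp [hsplit]
  | cons c t =>
    rw [hrc] at hsplit
    have hget : PySem.List.pyGet? s ((d.length : Nat) : Int) = some c := by
      rw [hsplit]; exact pyGet_append d t c
    by_cases hc : c = '.'
    · subst hc
      have hpart : pvPartitionDot s = (d, true, t) := by
        rw [hsplit, part_append d _ hnd]; simp [pvPartitionDot]
      have hlen : s.length = d.length + 1 + t.length := by simp [hsplit]; omega
      rw [hscan, hpart]
      dsimp only
      by_cases hd0 : 0 < d.length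
      · have hdig' : PySem.Chars.strIsdigit d = true := by
          simp [PySem.Chars.strIsdigit]
          exact ⟨fun h => by rw [h] at hd0; simp at hd0, hdig⟩
        rw [if_pos ⟨hd0, by omega, hget⟩]
        cases t with
        | nil =>
          rw [if_neg (by simp [hlen])]
          simp
        | cons c2 t2 =>
          have hget2 : PySem.List.pyGet? s (((d.length : Nat) : Int) + 1) = some c2 := by
            have h2 : s = (d ++ ['.']) ++ c2 :: t2 := by simp [hsplit]
            have h1 : ((d.length : Nat) : Int) + 1 = (((d ++ ['.']).length : Nat) : Int) := by simp
            rw [h2, h1]; exact pyGet_append (d ++ ['.']) t2 c2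
          rw [hget2]
          simp only [List.length_cons] at hlen
          by_cases hsp : PySem.Chars.isspace c2 = true
          · rw [if_pos ⟨by omega, by simp [hsp]⟩, if_pos ⟨rfl, hdig', by simp [hsp]⟩]
            have e1 : PySem.List.slice s (some (((d.length : Nat) : Int) + 2)) none = t2 := by
              have h3 : s = (d ++ ['.', c2]) ++ t2 := by simp [hsplit]
              have h4 : ((d.length : Nat) : Int) + 2 = (((d ++ ['.', c2]).length : Nat) : Int) := by
                simp [List.length_append]
              rw [h3, h4]; exact slice_append (d ++ ['.', c2]) t2
            rw [e1, slice_one]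
          · rw [if_neg (by simp [hsp]), if_neg (by simp [hsp])]
      · rw [if_neg (by simp [hd0])]
        have hde : d = [] := by cases d with | nil => rfl | cons a b => simp at hd0
        have : PySem.Chars.strIsdigit d = false := by simp [hde, PySem.Chars.strIsdigit]
        simp [this]
    · rw [hscan, if_neg (by rw [hget]; simp [hc])]
      have hcnd : PySem.Chars.isdigit c = false := dropWhile_head _ s c t (hr.symm ▸ hrc ▸ rfl)
      have hpart := part_append d (c :: t) hnd
      rw [← hsplit] at hpart
      rw [hpart]
      have hh' : (pvPartitionDot (c :: t)).1 = c :: (pvPartitionDot t).1 := by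
        simp [pvPartitionDot, hc]
      have : PySem.Chars.strIsdigit (d ++ (pvPartitionDot (c :: t)).1) = false := by
        rw [hh']; simp [PySem.Chars.strIsdigit, hcnd]
      simp [this]

-- ===== VERDICT (by name: the statement is the Claim_ definition above) =====
theorem strip_leading_numbering_py_spec : Claim_equal_strip_leading_numbering_py := by
  intro text _
  unfold Spec_strip_leading_numbering_py strip_leading_numbering_py strip_leading_numbering_py_alt
  exact pv_main _
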